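-- pv_equiv track=rewrite | github.com/celpegor216/ps | 프로그래머스/lv3/42579. 베스트앨범/베스트앨범.py | solution
-- ===== SOURCE A (Python) =====
-- def solution(genres, plays):
--     dic = {}
--     length = len(genres)
--
--     for i in range(length):
--         if dic.get(genres[i]):
--             dic[genres[i]][0] += plays[i]
--             dic[genres[i]].append([i, plays[i]])
--         else:
--             dic[genres[i]] = [plays[i], [i, plays[i]]]
--
--     lst = list(dic.items())
--     lst.sort(key=lambda x: -x[1][0])
--
--     answer = []
--
--     for item in lst:
--         temp = sorted(item[1][1:], key=lambda x: -x[1])[:2]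
--         for t in temp:
--             answer.append(t[0])
--
--     return answer
-- ===== SOURCE B (Python) =====
-- def _push(top, i, p):
--     # keep the best-two (index, play) pairs, play descending, ties by earlier index
--     if p > top[0][1]:
--         return [(i, p), top[0]]
--     if len(top) < 2 or p > top[1][1]:
--         return [top[0], (i, p)]
--     return top
--
--
-- def solution(genres, plays):
--     info = {}  # genre -> [total plays, best-two (index, play) pairs]
--     for i, (g, p) in enumerate(zip(genres, plays)):
--         if g in info:
--             rec = info[g]
--             rec[0] += p
--             rec[1] = _push(rec[1], i, p)
--         else:
--             info[g] = [p, [(i, p)]]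
--     order = sorted(info.items(), key=lambda kv: -kv[1][0])
--     return [i for _, (_, top) in order for i, _ in top]
-- ===== Notes on version B (the rewrite author's own statement) =====
-- stated objective: alternative
-- what changed: Instead of storing every song per genre and stable-sorting each genre's full song list before slicing [:2], B keeps only each genre's running total and its best-two (index, play) pairs, updated in one pass by direct comparison, so the per-genre sorts disappear.
import Mathlib
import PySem

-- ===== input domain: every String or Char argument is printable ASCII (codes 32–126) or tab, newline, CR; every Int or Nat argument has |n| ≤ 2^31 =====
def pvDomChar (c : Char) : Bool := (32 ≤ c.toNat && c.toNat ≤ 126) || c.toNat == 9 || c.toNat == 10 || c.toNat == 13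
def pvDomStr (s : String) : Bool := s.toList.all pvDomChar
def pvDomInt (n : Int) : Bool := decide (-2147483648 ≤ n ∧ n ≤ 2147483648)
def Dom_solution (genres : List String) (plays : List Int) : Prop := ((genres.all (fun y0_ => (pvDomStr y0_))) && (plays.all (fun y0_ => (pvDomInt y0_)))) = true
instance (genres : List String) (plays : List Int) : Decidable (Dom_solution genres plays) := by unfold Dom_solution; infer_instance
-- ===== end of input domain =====

-- B replaces A's per-genre full song lists and per-genre sorts by a single pass keeping only each
-- genre's running total and its best-two songs (objective: alternative decomposition, same result).
-- Python's heterogeneous dict value [total, [i,p], …] is modelled as the pair (total, entries : List (Int × Int)).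

-- ===== PORT A =====
-- the body of A's first for-loop (dic.get(g) is truthy iff g is present: the value is a non-empty list)
def pvStepA (dic : PySem.Dict String (Int × List (Int × Int))) (g : String) (p i : Int) :
    PySem.Dict String (Int × List (Int × Int)) :=
  match dic.get? g with
  | some v => dic.insert g (v.1 + p, v.2 ++ [(i, p)])      -- dic[g][0] += p; dic[g].append([i, p])
  | none => dic.insert g (p, [(i, p)])                     -- dic[g] = [p, [i, p]]

def solution (genres : List String) (plays : List Int) : List Int :=
  let length := PySem.List.len genres
  let dic :=
    (PySem.List.pyRange 0 length).foldl
      (fun dic i => pvStepA dic (PySem.List.pyGetD genres i "") (PySem.List.pyGetD plays i 0) i)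
      (PySem.Dict.mk [])
  let lst := PySem.List.sorted dic.items (fun x => -x.2.1) false
  lst.foldl
    (fun answer item =>
      let temp := PySem.List.slice (PySem.List.sorted item.2.2 (fun x => -x.2) false) none (some 2)
      temp.foldl (fun ans t => ans ++ [t.1]) answer)
    []

-- ===== PORT B =====
-- _push from Source B: keep the best-two (index, play) pairs, play descending, ties by earlier index
def pvPush (top : List (Int × Int)) (i p : Int) : List (Int × Int) :=
  match top with
  | [] => [(i, p)]          -- unreachable at call sites (a stored top is never empty)
  | (j, q) :: rest =>
      if q < p then [(i, p), (j, q)]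
      else
        match rest with
        | [] => [(j, q), (i, p)]
        | (_, r) :: _ => if r < p then [(j, q), (i, p)] else top

-- the body of B's loop
def pvStepB (info : PySem.Dict String (Int × List (Int × Int))) (g : String) (p i : Int) :
    PySem.Dict String (Int × List (Int × Int)) :=
  match info.get? g with
  | some rec => info.insert g (rec.1 + p, pvPush rec.2 i p)
  | none => info.insert g (p, [(i, p)])

def solution_alt (genres : List String) (plays : List Int) : List Int :=
  let info :=
    (PySem.List.enumerate (genres.zip plays)).foldl
      (fun info x => pvStepB info x.2.1 x.2.2 x.1)
      (PySem.Dict.mk [])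
  let order := PySem.List.sorted info.items (fun kv => -kv.2.1) false
  order.flatMap (fun kv => kv.2.2.map Prod.fst)

-- ===== PRECONDITION & SPEC =====
-- A indexes plays[i] for every i < len(genres): it raises IndexError iff plays is shorter than genres.
def Pre_solution (genres : List String) (plays : List Int) : Prop :=
  genres.length ≤ plays.length
instance (genres : List String) (plays : List Int) : Decidable (Pre_solution genres plays) := by
  unfold Pre_solution; infer_instance

def pvWitness_solution : List String × List Int := (["rock", "pop", "rock"], [10, 20, 10])

def Spec_solution (genres : List String) (plays : List Int) (out : List Int) : Prop := out = solution_alt genres plays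
instance (genres : List String) (plays : List Int) (out : List Int) : Decidable (Spec_solution genres plays out) := by unfold Spec_solution; infer_instance

-- ===== CLAIM (what is proved, stated in full; the proofs are below) =====
def Claim_equal_solution : Prop := ∀ (genres : List String) (plays : List Int), Dom_solution genres plays → Pre_solution genres plays → Spec_solution genres plays (solution genres plays)

-- ===== LEMMAS AND PROOFS =====

-- B's stored value as a function of A's stored value: total kept, entries replaced by top-two of the
-- play-descending stable sort
def pvF (it : String × (Int × List (Int × Int))) : String × (Int × List (Int × Int)) :=
  (it.1, (it.2.1, (PySem.List.sorted it.2.2 (fun x => -x.2) false).take 2))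

theorem pvPush_take2 (s : List (Int × Int)) (i p : Int) :
    (PySem.List.insertBy (fun a b : Int × Int => decide ((fun x : Int × Int => -x.2) a < (fun x : Int × Int => -x.2) b)) (i, p) s).take 2
      = pvPush (s.take 2) i p := by
  match s with
  | [] => rfl
  | (j, q) :: rest =>
    simp only [PySem.List.insertBy]
    by_cases h1 : q < p
    · simp [pvPush, h1]
    · have hd : decide ((- p : Int) < - q) = false := by rw [decide_eq_false_iff_not]; omega
      simp only [hd, Bool.false_eq_true, if_false]
      match rest with
      | [] =>
        simp only [PySem.List.insertBy]
        simp [pvPush, h1]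
      | (k, r) :: t =>
        simp only [PySem.List.insertBy]
        by_cases h2 : r < p
        · simp [pvPush, h1, h2]
        · simp [pvPush, h1, h2]

-- sorted of an appended element is insertBy into the sorted prefix (stable insertion sort)
theorem pvSorted_append (es : List (Int × Int)) (x : Int × Int) :
    PySem.List.sorted (es ++ [x]) (fun y : Int × Int => -y.2) false
      = PySem.List.insertBy (fun a b : Int × Int => decide ((fun y : Int × Int => -y.2) a < (fun y : Int × Int => -y.2) b)) x
          (PySem.List.sorted es (fun y : Int × Int => -y.2) false) := by
  rw [PySem.List.sorted_eq_foldl_insertBy, PySem.List.sorted_eq_foldl_insertBy, List.foldl_append]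
  rfl

theorem pvF_fst (it : String × (Int × List (Int × Int))) : (pvF it).1 = it.1 := rfl

theorem pvStep_comm (l : List (String × (Int × List (Int × Int)))) (g : String) (p i : Int) :
    pvStepB ⟨l.map pvF⟩ g p i = ⟨(pvStepA ⟨l⟩ g p i).items.map pvF⟩ := by
  have hfind : List.find? (fun q => q.1 == g) (l.map pvF)
      = (List.find? (fun q => q.1 == g) l).map pvF := by
    rw [List.find?_map]; rfl
  have hcont : (⟨l.map pvF⟩ : PySem.Dict String (Int × List (Int × Int))).contains g
      = (⟨l⟩ : PySem.Dict String (Int × List (Int × Int))).contains g := by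
    simp only [PySem.Dict.contains, List.any_map]; rfl
  unfold pvStepA pvStepB
  simp only [PySem.Dict.get?]
  rw [hfind]
  rcases hf : List.find? (fun q => q.1 == g) l with _ | v
  · rw [hf]
    have hany : (l.any fun q => q.1 == g) = false := by
      rw [List.any_eq_false]
      intro q hq
      have := List.find?_eq_none.mp hf q hq
      simpa using this
    have hanyF : ((l.map pvF).any fun q => q.1 == g) = false := by
      rw [List.any_map]
      exact hany
    simp only [PySem.Dict.insert, PySem.Dict.contains, hany, hanyF,
      Bool.false_eq_true, if_false]
    simp [pvF, PySem.List.sorted, PySem.List.insertBy]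
  · rw [hf]
    simp only [Option.map_some]
    have hpred := List.find?_some hf
    have hany : (l.any fun q => q.1 == g) = true := by
      rw [List.any_eq_true]
      exact ⟨v, List.mem_of_find?_eq_some hf, hpred⟩
    have hanyF : ((l.map pvF).any fun q => q.1 == g) = true := by
      rw [List.any_map]
      exact hany
    simp only [PySem.Dict.insert, PySem.Dict.contains, hany, hanyF, if_true]
    congr 1
    rw [List.map_map, List.map_map]
    apply List.map_congr_left
    intro q _
    by_cases hq : (q.1 == g) = true
    · simp only [Function.comp_apply, pvF_fst, hq, if_pos]
      simp only [pvF, pvSorted_append, pvPush_take2]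
    · simp only [Function.comp_apply, pvF_fst, hq, Bool.false_eq_true, if_false]

theorem pvInv (L : List (Int × (String × Int))) :
    ∀ (l : List (String × (Int × List (Int × Int)))),
    L.foldl (fun d x => pvStepB d x.2.1 x.2.2 x.1) ⟨l.map pvF⟩
      = ⟨(L.foldl (fun d x => pvStepA d x.2.1 x.2.2 x.1) ⟨l⟩).items.map pvF⟩ := by
  induction L with
  | nil => intro l; rfl
  | cons x L ih =>
    intro l
    simp only [List.foldl_cons, pvStep_comm]
    exact ih _

theorem pvRange_self (a : Int) : PySem.List.pyRange a a = [] := by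
  simp [PySem.List.pyRange]

-- A's index loop over range(len(genres)) is the fold over the indexed zip of the two lists
theorem pvSpine (gs : List String) :
    ∀ (ps : List Int) (genres : List String) (plays : List Int) (k : Nat)
      (d : PySem.Dict String (Int × List (Int × Int))),
      genres.drop k = gs → plays.drop k = ps → gs.length ≤ ps.length →
      (PySem.List.pyRange (k : Int) ((k : Int) + gs.length)).foldl
          (fun dic i => pvStepA dic (PySem.List.pyGetD genres i "") (PySem.List.pyGetD plays i 0) i) d
        = (PySem.List.enumerate (gs.zip ps) (k : Int)).foldl (fun d x => pvStepA d x.2.1 x.2.2 x.1) d := by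
  induction gs with
  | nil =>
    intro ps genres plays k d hg hp hlen
    have h0 : ((k : Int) + ((List.length ([] : List String) : Nat) : Int)) = (k : Int) := by
      simp
    rw [h0, pvRange_self]
    rfl
  | cons g gs ih =>
    intro ps genres plays k d hg hp hlen
    match ps with
    | [] => simp at hlen
    | p :: ps =>
      have hcons : (PySem.List.pyRange (k : Int) ((k : Int) + (g :: gs).length))
          = (k : Int) :: PySem.List.pyRange ((k : Int) + 1) ((k : Int) + (g :: gs).length) := by
        apply PySem.List.pyRange_one_cons
        simp only [List.length_cons]
        push_cast
        omega
      have hgk : PySem.List.pyGetD genres (k : Int) "" = g := by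
        rw [PySem.List.pyGetD_natCast]
        have h0 : (genres.drop k)[0]? = some g := by rw [hg]; rfl
        rw [List.getElem?_drop] at h0
        simp only [Nat.add_zero] at h0
        simp [List.getD, h0]
      have hpk : PySem.List.pyGetD plays (k : Int) 0 = p := by
        rw [PySem.List.pyGetD_natCast]
        have h0 : (plays.drop k)[0]? = some p := by rw [hp]; rfl
        rw [List.getElem?_drop] at h0
        simp only [Nat.add_zero] at h0
        simp [List.getD, h0]
      rw [hcons]
      have henum : PySem.List.enumerate ((g, p) :: gs.zip ps) ((k : Int))
          = ((k : Int), (g, p)) :: PySem.List.enumerate (gs.zip ps) ((k : Int) + 1) := rfl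
      simp only [List.zip_cons_cons, henum, List.foldl_cons]
      rw [hgk, hpk]
      have hg' : genres.drop (k + 1) = gs := by
        have h := congrArg List.tail hg
        simpa [List.tail_drop] using h
      have hp' : plays.drop (k + 1) = ps := by
        have h := congrArg List.tail hp
        simpa [List.tail_drop] using h
      have hrec := ih ps genres plays (k + 1)
        (pvStepA d g p (k : Int)) hg' hp' (by simpa using Nat.le_of_succ_le_succ (by simpa using hlen))
      have harg : ((k : Int) + 1) = ((k + 1 : Nat) : Int) := by push_cast; ring
      have hstop : (k : Int) + ((g :: gs).length : Int) = ((k + 1 : Nat) : Int) + (gs.length : Int) := by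
        simp only [List.length_cons]; push_cast; ring
      rw [hstop, harg]
      exact hrec

-- insertBy with the genre-total key commutes with pvF (pvF preserves that key)
theorem pvInsertBy_map (x : String × (Int × List (Int × Int)))
    (s : List (String × (Int × List (Int × Int)))) :
    (PySem.List.insertBy (fun a b => decide ((fun y : String × (Int × List (Int × Int)) => -y.2.1) a < (fun y => -y.2.1) b)) x s).map pvF
      = PySem.List.insertBy (fun a b => decide ((fun y : String × (Int × List (Int × Int)) => -y.2.1) a < (fun y => -y.2.1) b)) (pvF x) (s.map pvF) := by
  induction s with
  | nil => rfl
  | cons y t ih =>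
    have hkey : (decide ((-(pvF x).2.1 : Int) < -(pvF y).2.1)) = (decide ((-x.2.1 : Int) < -y.2.1)) := rfl
    simp only [List.map_cons, PySem.List.insertBy, hkey]
    by_cases h : decide ((-x.2.1 : Int) < -y.2.1) = true
    · rw [if_pos h, if_pos h]
      simp
    · rw [if_neg h, if_neg h]
      simp only [List.map_cons, ih]

theorem pvSorted_map (l : List (String × (Int × List (Int × Int)))) :
    PySem.List.sorted (l.map pvF) (fun y => -y.2.1) false
      = (PySem.List.sorted l (fun y => -y.2.1) false).map pvF := by
  rw [PySem.List.sorted_eq_foldl_insertBy, PySem.List.sorted_eq_foldl_insertBy, List.foldl_map]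
  suffices h : ∀ (acc : List (String × (Int × List (Int × Int)))),
      List.foldl (fun acc x => PySem.List.insertBy (fun a b => decide ((fun y : String × (Int × List (Int × Int)) => -y.2.1) a < (fun y => -y.2.1) b)) (pvF x) acc) (acc.map pvF) l
        = (List.foldl (fun acc x => PySem.List.insertBy (fun a b => decide ((fun y : String × (Int × List (Int × Int)) => -y.2.1) a < (fun y => -y.2.1) b)) x acc) acc l).map pvF by
    simpa using h []
  induction l with
  | nil => intro acc; rfl
  | cons x t ih =>
    intro acc
    simp only [List.foldl_cons, ← pvInsertBy_map]
    exact ih _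

theorem pvMain (genres : List String) (plays : List Int)
    (hpre : genres.length ≤ plays.length) :
    solution genres plays = solution_alt genres plays := by
  unfold solution solution_alt
  dsimp only
  have hlen : PySem.List.len genres = (genres.length : Int) := by
    simp [PySem.List.len]
  rw [hlen]
  have hsp := pvSpine genres plays genres plays 0 (PySem.Dict.mk []) (by simp) (by simp) hpre
  simp only [Nat.cast_zero, zero_add] at hsp
  rw [hsp]
  have hinv := pvInv (PySem.List.enumerate (genres.zip plays) 0) []
  simp only [List.map_nil] at hinv
  rw [hinv]
  rw [pvSorted_map]
  have hsl : ∀ xs : List (Int × Int), PySem.List.slice xs none (some 2) = xs.take 2 := by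
    intro xs
    rw [PySem.List.slice_to xs (by norm_num)]
    rfl
  simp only [hsl, PySem.List.foldl_append_singleton_eq_map]
  rw [PySem.List.foldl_append_eq_flatMap]
  rw [List.flatMap_map]
  rfl

-- ===== VERDICT (by name: the statement is the Claim_ definition above) =====
theorem solution_spec : Claim_equal_solution := by
  intro genres plays _hdom hpre
  exact pvMain genres plays hpre
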